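-- pv_equiv track=rewrite | github.com/nc1729/ternary_computer | src/triangulate/handle_instr.py | signed_value_to_tryte
-- ===== SOURCE A (Python) =====
-- septavingt_chars = "MLKJIHGFEDCBA0abcdefghijklm"
--
-- def signed_value_to_tryte(arg):
--     output_string = ""
--     dividend = int(arg)
--     remainder = 0
--     for _ in range(3):
--         remainder = dividend % 27
--         dividend = dividend // 27
--         if (remainder > 13):
--             remainder -= 27
--             dividend += 1
--         elif (remainder < -13):
--             remainder += 27
--             dividend -= 1
--         output_string += septavingt_chars[13 + remainder]
--     return output_string[::-1]
-- ===== SOURCE B (Python) =====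
-- septavingt_chars = "MLKJIHGFEDCBA0abcdefghijklm"
--
-- def signed_value_to_tryte(arg):
--     # Shift by 9841 (= 13*(729+27+1)) so balanced digits become plain base-27 digits,
--     # then read off the three digits directly -- no carry loop, no reversal.
--     u = (int(arg) + 9841) % 19683
--     return septavingt_chars[u // 729] + septavingt_chars[(u // 27) % 27] + septavingt_chars[u % 27]
-- ===== Notes on version B (the rewrite author's own statement) =====
-- stated objective: simpler
-- what changed: Replaces the per-digit balanced-remainder carry loop and the final string reversal by a single offset shift modulo the tryte range followed by direct extraction of the digits in output order.
import Mathlib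
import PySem

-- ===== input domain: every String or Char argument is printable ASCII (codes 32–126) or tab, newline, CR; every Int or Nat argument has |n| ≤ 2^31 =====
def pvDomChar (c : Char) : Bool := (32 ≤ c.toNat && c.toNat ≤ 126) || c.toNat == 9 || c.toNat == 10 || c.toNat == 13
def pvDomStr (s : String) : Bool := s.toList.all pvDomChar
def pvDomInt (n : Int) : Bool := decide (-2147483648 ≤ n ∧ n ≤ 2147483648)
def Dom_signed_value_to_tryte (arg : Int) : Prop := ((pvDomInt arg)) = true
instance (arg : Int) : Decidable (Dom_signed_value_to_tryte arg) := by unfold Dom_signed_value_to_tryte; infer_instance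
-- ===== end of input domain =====

-- ===== PORT A =====
-- B replaces A's balanced-remainder carry loop and final reversal by one offset shift
-- and direct base-27 digit extraction (objective: simpler); same return value on all ints.
def septavingt_chars : String := "MLKJIHGFEDCBA0abcdefghijklm"

-- septavingt_chars[i] for an always-in-range index (Python would raise IndexError out of range;
-- the ports only use it with 0 <= i <= 26, where pyGet? is some).
def svtChar (i : Int) : Char := (PySem.Str.pyGet? septavingt_chars i).getD ' '

-- the body of A's `for _ in range(3)` loop: state = (output_string as chars, dividend, remainder)
def svtStep (st : List Char × Int × Int) (_i : Int) : List Char × Int × Int :=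
  let remainder := PySem.Int.mod st.2.1 27
  let dividend  := PySem.Int.floordiv st.2.1 27
  let (remainder, dividend) :=
    if remainder > 13 then (remainder - 27, dividend + 1)
    else if remainder < -13 then (remainder + 27, dividend - 1)
    else (remainder, dividend)
  (st.1 ++ [svtChar (13 + remainder)], dividend, remainder)

def signed_value_to_tryte (arg : Int) : String :=
  let st := (PySem.List.pyRange 0 3 1).foldl svtStep ([], arg, 0)
  String.ofList st.1.reverse   -- output_string[::-1] (= PySem.Str.slice? s none none (-1))

-- ===== PORT B =====
def signed_value_to_tryte_alt (arg : Int) : String :=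
  let u := PySem.Int.mod (arg + 9841) 19683
  String.ofList [svtChar (PySem.Int.floordiv u 729),
                 svtChar (PySem.Int.mod (PySem.Int.floordiv u 27) 27),
                 svtChar (PySem.Int.mod u 27)]

-- ===== PRECONDITION & SPEC =====
def Spec_signed_value_to_tryte (arg : Int) (out : String) : Prop := out = signed_value_to_tryte_alt arg
instance (arg : Int) (out : String) : Decidable (Spec_signed_value_to_tryte arg out) := by unfold Spec_signed_value_to_tryte; infer_instance

-- ===== CLAIM (what is proved, stated in full; the proofs are below) =====
def Claim_equal_signed_value_to_tryte : Prop := ∀ (arg : Int), Dom_signed_value_to_tryte arg → Spec_signed_value_to_tryte arg (signed_value_to_tryte arg)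

-- ===== LEMMAS AND PROOFS =====
theorem pyRange03 : PySem.List.pyRange 0 3 1 = [0, 1, 2] := by decide

-- ===== VERDICT (by name: the statement is the Claim_ definition above) =====
theorem signed_value_to_tryte_spec : Claim_equal_signed_value_to_tryte := by
  intro arg _
  unfold Spec_signed_value_to_tryte signed_value_to_tryte signed_value_to_tryte_alt
  rw [pyRange03]
  simp only [List.foldl, svtStep,
    PySem.Int.mod_eq_emod_of_pos (show (0:Int) < 27 by norm_num),
    PySem.Int.floordiv_eq_ediv_of_pos (show (0:Int) < 27 by norm_num),
    PySem.Int.mod_eq_emod_of_pos (show (0:Int) < 19683 by norm_num),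
    PySem.Int.floordiv_eq_ediv_of_pos (show (0:Int) < 729 by norm_num)]
  split_ifs <;>
    (refine congrArg String.ofList ?_
     simp only [List.nil_append, List.cons_append, List.reverse_cons, List.reverse_nil, List.cons.injEq, and_true]
     refine ⟨congrArg _ (by omega), congrArg _ (by omega), congrArg _ (by omega)⟩)
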